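-- pv_equiv track=rewrite | github.com/Kirachon/Name_Matching | src/standardizer.py | remove_name_prefixes
-- ===== SOURCE A (Python) =====
-- def remove_name_prefixes(name: str) -> str:
--     """
--     Remove common name prefixes like Mr., Mrs., etc.
--
--     Args:
--         name: The name to process
--
--     Returns:
--         Name with prefixes removed
--     """
--     prefixes = [
--         "mr", "mr.", "mrs", "mrs.", "ms", "ms.", "miss", "dr", "dr.",
--         "prof", "prof.", "rev", "rev.", "hon", "hon.", "atty", "atty."
--     ]
--
--     # Check if the name starts with any prefix
--     name_lower = name.lower()
--     for prefix in prefixes: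
--         if name_lower.startswith(prefix + " "):
--             return name[len(prefix):].strip()
--
--     return name
-- ===== SOURCE B (Python) =====
-- _PREFIXES = {
--     "mr", "mr.", "mrs", "mrs.", "ms", "ms.", "miss", "dr", "dr.",
--     "prof", "prof.", "rev", "rev.", "hon", "hon.", "atty", "atty."
-- }
--
--
-- def remove_name_prefixes(name: str) -> str:
--     head, sep, rest = name.partition(" ")
--     if sep and head.lower() in _PREFIXES:
--         return rest.strip()
--     return name
-- ===== Notes on version B (the rewrite author's own statement) =====
-- stated objective: idiomatic
-- what changed: B splits the name once with str.partition at the first space, then does a single set-membership test on the lowercased first word, instead of A's loop over 17 prefixes each doing a lower().startswith test and a slice by prefix length.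
import Mathlib
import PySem

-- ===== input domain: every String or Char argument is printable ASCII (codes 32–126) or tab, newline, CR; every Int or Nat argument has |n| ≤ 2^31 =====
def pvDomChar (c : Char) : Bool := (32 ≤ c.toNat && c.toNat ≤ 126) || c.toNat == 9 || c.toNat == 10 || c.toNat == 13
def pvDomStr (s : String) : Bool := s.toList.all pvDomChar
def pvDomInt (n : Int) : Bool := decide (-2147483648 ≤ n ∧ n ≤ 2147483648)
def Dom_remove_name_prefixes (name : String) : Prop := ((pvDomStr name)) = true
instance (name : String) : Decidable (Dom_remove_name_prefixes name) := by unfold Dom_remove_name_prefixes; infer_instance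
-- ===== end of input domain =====

-- B replaces A's scan over 17 prefixes (lower().startswith per prefix, slice by prefix length)
-- by one str.partition plus a single set lookup of the lowercased first word (objective: idiomatic).

-- ===== PORT A =====
def pvPrefixes : List (List Char) :=
  ["mr", "mr.", "mrs", "mrs.", "ms", "ms.", "miss", "dr", "dr.",
   "prof", "prof.", "rev", "rev.", "hon", "hon.", "atty", "atty."].map String.toList

def pvLoopA (nl l : List Char) (name : String) : List (List Char) → String
  | [] => name
  | p :: ps =>
    if PySem.Chars.startswith nl (p ++ [' ']) then
      -- name[len(prefix):] with a nonnegative in-range start is List.drop; .strip() is Chars.strip (exact)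
      String.ofList (PySem.Chars.strip (l.drop p.length))
    else pvLoopA nl l name ps

def remove_name_prefixes (name : String) : String :=
  pvLoopA (PySem.Chars.lower name.toList) name.toList name pvPrefixes

-- ===== PORT B =====
def pvPrefixSet : PySem.Set (List Char) :=
  PySem.Set.ofList
    (["mr", "mr.", "mrs", "mrs.", "ms", "ms.", "miss", "dr", "dr.",
      "prof", "prof.", "rev", "rev.", "hon", "hon.", "atty", "atty."].map String.toList)

def remove_name_prefixes_alt (name : String) : String :=
  let l := name.toList
  -- name.partition(" "), hand-ported (exact): head = chars before the first space,
  -- sep is nonempty iff a space occurs in name, rest = chars after the first space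
  let head := l.takeWhile (fun c => c != ' ')
  let rest := (l.dropWhile (fun c => c != ' ')).drop 1
  if l.contains ' ' && pvPrefixSet.contains (PySem.Chars.lower head) then
    String.ofList (PySem.Chars.strip rest)
  else name

-- ===== PRECONDITION & SPEC =====
def Spec_remove_name_prefixes (name : String) (out : String) : Prop := out = remove_name_prefixes_alt name
instance (name : String) (out : String) : Decidable (Spec_remove_name_prefixes name out) := by unfold Spec_remove_name_prefixes; infer_instance

-- ===== CLAIM (what is proved, stated in full; the proofs are below) =====
def Claim_equal_remove_name_prefixes : Prop := ∀ (name : String), Dom_remove_name_prefixes name → Spec_remove_name_prefixes name (remove_name_prefixes name)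

-- ===== LEMMAS AND PROOFS =====

theorem pv_charOfNat_toNat (n : Nat) (h : n < 55296) : (Char.ofNat n).toNat = n := by
  unfold Char.ofNat
  split
  · rfl
  · rename_i hv; exfalso; apply hv; constructor; omega

theorem pv_lowerChar_space_iff (c : Char) : PySem.Chars.lowerChar c = ' ' ↔ c = ' ' := by
  unfold PySem.Chars.lowerChar PySem.Chars.isupper
  split
  · rename_i h
    simp only [Bool.and_eq_true, decide_eq_true_eq, Char.le_def, UInt32.le_iff_toNat_le] at h
    have hA : 65 ≤ c.toNat ∧ c.toNat ≤ 90 := h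
    constructor
    · intro he
      exfalso
      have h2 : (Char.ofNat (c.toNat + 32)).toNat = (' ' : Char).toNat := by rw [he]
      rw [pv_charOfNat_toNat _ (by omega), show (' ' : Char).toNat = 32 from rfl] at h2
      omega
    · intro he
      subst he
      revert hA
      decide
  · simp

theorem pv_mem_space_lower (l : List Char) : ' ' ∈ PySem.Chars.lower l ↔ ' ' ∈ l := by
  simp [PySem.Chars.lower, List.mem_map]
  constructor
  · rintro ⟨a, ha, he⟩
    rwa [(pv_lowerChar_space_iff a).mp he] at ha
  · intro h
    exact ⟨' ', h, (pv_lowerChar_space_iff ' ').mpr rfl⟩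

theorem pv_takeWhile_lower (l : List Char) :
    (PySem.Chars.lower l).takeWhile (fun c => c != ' ')
      = PySem.Chars.lower (l.takeWhile (fun c => c != ' ')) := by
  have hf : ((fun c => c != ' ') ∘ PySem.Chars.lowerChar) = (fun c : Char => c != ' ') := by
    funext c
    simp only [Function.comp]
    by_cases h : c = ' '
    · subst h; simp [(pv_lowerChar_space_iff ' ').mpr rfl]
    · have h2 : PySem.Chars.lowerChar c ≠ ' ' := fun he => h ((pv_lowerChar_space_iff c).mp he)
      rw [show (c != ' ') = true by simp [h], show (PySem.Chars.lowerChar c != ' ') = true by simp [h2]]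
  simp only [PySem.Chars.lower, List.takeWhile_map, hf]

theorem pv_takeWhile_dropWhile_no_space (p t : List Char) (hp : ' ' ∉ p) :
    (p ++ ' ' :: t).takeWhile (fun c => c != ' ') = p ∧
    (p ++ ' ' :: t).dropWhile (fun c => c != ' ') = ' ' :: t := by
  induction p with
  | nil => simp
  | cons a p ih =>
    have ha : a ≠ ' ' := fun h => hp (h ▸ List.mem_cons_self)
    have h2 := ih (fun h => hp (List.mem_cons_of_mem _ h))
    simp [List.dropWhile_cons, ha, h2.1, h2.2]

theorem pv_dropWhile_space (l : List Char) (hs : ' ' ∈ l) :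
    l.dropWhile (fun c => c != ' ') = ' ' :: (l.dropWhile (fun c => c != ' ')).drop 1 := by
  rcases hd : l.dropWhile (fun c => c != ' ') with _ | ⟨c, t⟩
  · exfalso
    rw [List.dropWhile_eq_nil_iff] at hd
    have := hd ' ' hs
    simp at this
  · have hc := List.head_dropWhile_not (fun c => c != ' ') (l := l) (by rw [hd]; simp)
    simp only [hd, List.head_cons] at hc
    simp at hc
    subst hc
    rfl

theorem pv_prefix_space_iff (cs p : List Char) (hp : ' ' ∉ p) :
    ((p ++ [' ']) <+: cs) ↔ (' ' ∈ cs ∧ cs.takeWhile (fun c => c != ' ') = p) := by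
  constructor
  · rintro ⟨t, rfl⟩
    rw [List.append_assoc]
    have h := pv_takeWhile_dropWhile_no_space p t hp
    exact ⟨by simp, by simpa using h.1⟩
  · rintro ⟨hs, htw⟩
    have hsplit := List.takeWhile_append_dropWhile (p := fun c => c != ' ') (l := cs)
    have hd := pv_dropWhile_space cs hs
    refine ⟨(cs.dropWhile (fun c => c != ' ')).drop 1, ?_⟩
    calc p ++ [' '] ++ (cs.dropWhile (fun c => c != ' ')).drop 1
        = p ++ (' ' :: (cs.dropWhile (fun c => c != ' ')).drop 1) := by simp
      _ = cs.takeWhile (fun c => c != ' ') ++ cs.dropWhile (fun c => c != ' ') := by rw [htw, ← hd]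
      _ = cs := hsplit

theorem pv_match_iff (l p : List Char) (hp : ' ' ∉ p) :
    PySem.Chars.startswith (PySem.Chars.lower l) (p ++ [' ']) = true ↔
      (' ' ∈ l ∧ PySem.Chars.lower (l.takeWhile (fun c => c != ' ')) = p) := by
  rw [PySem.Chars.startswith_iff, pv_prefix_space_iff _ _ hp, pv_mem_space_lower, pv_takeWhile_lower]

theorem pv_strip_cons_space (xs : List Char) :
    PySem.Chars.strip (' ' :: xs) = PySem.Chars.strip xs := by
  simp [PySem.Chars.strip, PySem.Chars.lstrip, List.dropWhile_cons,
        show PySem.Chars.isspace ' ' = true from rfl]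

theorem pv_drop_match (l p : List Char) (hs : ' ' ∈ l)
    (h : PySem.Chars.lower (l.takeWhile (fun c => c != ' ')) = p) :
    PySem.Chars.strip (l.drop p.length)
      = PySem.Chars.strip ((l.dropWhile (fun c => c != ' ')).drop 1) := by
  have hlen : p.length = (l.takeWhile (fun c => c != ' ')).length := by
    rw [← h]; simp [PySem.Chars.lower]
  have hsplit := List.takeWhile_append_dropWhile (p := fun c => c != ' ') (l := l)
  have hdrop : l.drop p.length = l.dropWhile (fun c => c != ' ') := by
    conv_lhs => rw [← hsplit]
    rw [hlen, List.drop_left]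
  conv_lhs => rw [hdrop, pv_dropWhile_space l hs]
  rw [pv_strip_cons_space]

theorem pv_loopA_eq (l : List Char) (name : String) (ps : List (List Char))
    (h : ∀ p ∈ ps, ' ' ∉ p) :
    pvLoopA (PySem.Chars.lower l) l name ps =
      if ' ' ∈ l ∧ PySem.Chars.lower (l.takeWhile (fun c => c != ' ')) ∈ ps then
        String.ofList (PySem.Chars.strip ((l.dropWhile (fun c => c != ' ')).drop 1))
      else name := by
  induction ps with
  | nil => simp [pvLoopA]
  | cons p ps ih =>
    have hp : ' ' ∉ p := h p List.mem_cons_self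
    rw [pvLoopA]
    by_cases hc : ' ' ∈ l ∧ PySem.Chars.lower (l.takeWhile (fun c => c != ' ')) = p
    · rw [if_pos ((pv_match_iff l p hp).mpr hc)]
      rw [if_pos ⟨hc.1, by rw [hc.2]; exact List.mem_cons_self⟩]
      rw [pv_drop_match l p hc.1 hc.2]
    · rw [if_neg (fun hh => hc ((pv_match_iff l p hp).mp hh))]
      rw [ih (fun q hq => h q (List.mem_cons_of_mem _ hq))]
      by_cases hs : ' ' ∈ l
      · have hmem : (PySem.Chars.lower (l.takeWhile (fun c => c != ' ')) ∈ p :: ps)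
            ↔ (PySem.Chars.lower (l.takeWhile (fun c => c != ' ')) ∈ ps) := by
          constructor
          · intro hm
            rcases List.mem_cons.mp hm with he | hm
            · exact absurd ⟨hs, he⟩ hc
            · exact hm
          · exact List.mem_cons_of_mem _
        simp only [hs, true_and, hmem]
      · simp [hs]

-- ===== VERDICT (by name: the statement is the Claim_ definition above) =====
theorem remove_name_prefixes_spec : Claim_equal_remove_name_prefixes := by
  intro name _dom
  unfold Spec_remove_name_prefixes remove_name_prefixes remove_name_prefixes_alt
  rw [pv_loopA_eq _ _ _ (by decide)]
  simp only []
  by_cases hc : ' ' ∈ name.toList ∧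
      PySem.Chars.lower (name.toList.takeWhile (fun c => c != ' ')) ∈ pvPrefixes
  · rw [if_pos hc]
    rw [if_pos (by
      simp only [Bool.and_eq_true, List.contains_iff_mem]
      exact ⟨hc.1, by simpa [pvPrefixSet, PySem.Set.contains, List.contains_iff_mem,
        PySem.Set.mem_ofList, pvPrefixes] using hc.2⟩)]
  · rw [if_neg hc]
    rw [if_neg (by
      simp only [Bool.and_eq_true, List.contains_iff_mem]
      intro hh
      exact hc ⟨hh.1, by simpa [pvPrefixSet, PySem.Set.contains, List.contains_iff_mem,
        PySem.Set.mem_ofList, pvPrefixes] using hh.2⟩)]
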